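-- pv_equiv track=rewrite | github.com/Hagb/pandoc_cqu_thesis | pandoc_word_helper/fieldCode.py | genFieldXml
-- ===== SOURCE A (Python) =====
-- def genFieldXml(fieldStr: str, isBlock: bool = False):
--     fieldStr: str = fieldStr.strip()
--     if not (fieldStr.startswith('{') and fieldStr.endswith('}')):
--         fieldStr = '{' + fieldStr + '}'
--     result_str = "<w:p><w:r>" if isBlock else "<w:r>"
--     temp_str = ""
--     flag = True  # 用来标定域代码，False代表域代码的显示文本
--     for s in fieldStr:
--         if s not in ['{', '|', "}"]:
--             temp_str += s
--         elif s == '{':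
--             if len(temp_str) > 0:
--                 result_str += """<w:instrText xml:space="preserve">%s</w:instrText>""" % temp_str
--             result_str += """<w:fldChar w:fldCharType="begin"/>"""
--             temp_str = ""
--         elif s == '|':
--             if flag and len(temp_str) > 0:
--                 result_str += """<w:instrText xml:space="preserve">%s</w:instrText>""" % temp_str
--             temp_str = ""
--             flag = False
--         elif s == '}':
--             if flag == False:
--                 result_str += """<w:fldChar w:fldCharType="separate"/>""" + \
--                     """<w:t>%s</w:t>""" % temp_str
--                 flag = True
--             elif len(temp_str) > 0:
--                 result_str += """<w:instrText xml:space="preserve">%s</w:instrText>""" % temp_str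
--             result_str += """<w:fldChar w:fldCharType="end"/>"""
--             temp_str = ""
--     return result_str + ("</w:r></w:p>" if isBlock else "</w:r>")
-- ===== SOURCE B (Python) =====
-- # B: token-based recursive emitter building a list of XML pieces, joined once at the end.
-- _INSTR = '<w:instrText xml:space="preserve">%s</w:instrText>'
--
--
-- def _tokens(s):
--     # Alternating text segments and single-char delimiter tokens; starts and ends with a segment.
--     toks, seg = [], ""
--     for c in s:
--         if c in "{|}":
--             toks.append(seg)
--             toks.append(c)
--             seg = ""
--         else:
--             seg += c
--     toks.append(seg)
--     return toks
--
--
-- def _emit(toks, flag):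
--     if len(toks) == 1:
--         return []
--     text, d, rest = toks[0], toks[1], toks[2:]
--     if d == '{':
--         head = ([_INSTR % text] if text else []) + ['<w:fldChar w:fldCharType="begin"/>']
--         return head + _emit(rest, flag)
--     if d == '|':
--         head = [_INSTR % text] if (flag and text) else []
--         return head + _emit(rest, False)
--     # d == '}'
--     if not flag:
--         head = ['<w:fldChar w:fldCharType="separate"/>', '<w:t>%s</w:t>' % text]
--         nf = True
--     elif text:
--         head = [_INSTR % text]
--         nf = flag
--     else:
--         head = []
--         nf = flag
--     return head + ['<w:fldChar w:fldCharType="end"/>'] + _emit(rest, nf)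
--
--
-- def genFieldXml(fieldStr: str, isBlock: bool = False):
--     s = fieldStr.strip()
--     if not (s.startswith('{') and s.endswith('}')):
--         s = '{' + s + '}'
--     mid = "".join(_emit(_tokens(s), True))
--     return ("<w:p><w:r>" + mid + "</w:r></w:p>") if isBlock else ("<w:r>" + mid + "</w:r>")
-- ===== Notes on version B (the rewrite author's own statement) =====
-- stated objective: alternative
-- what changed: A's single char-by-char loop mutating result_str/temp_str is replaced by a tokenizer that splits the string into text segments and delimiter tokens, plus a recursive emitter over the token list that returns a list of XML pieces joined once at the end.
import Mathlib
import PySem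

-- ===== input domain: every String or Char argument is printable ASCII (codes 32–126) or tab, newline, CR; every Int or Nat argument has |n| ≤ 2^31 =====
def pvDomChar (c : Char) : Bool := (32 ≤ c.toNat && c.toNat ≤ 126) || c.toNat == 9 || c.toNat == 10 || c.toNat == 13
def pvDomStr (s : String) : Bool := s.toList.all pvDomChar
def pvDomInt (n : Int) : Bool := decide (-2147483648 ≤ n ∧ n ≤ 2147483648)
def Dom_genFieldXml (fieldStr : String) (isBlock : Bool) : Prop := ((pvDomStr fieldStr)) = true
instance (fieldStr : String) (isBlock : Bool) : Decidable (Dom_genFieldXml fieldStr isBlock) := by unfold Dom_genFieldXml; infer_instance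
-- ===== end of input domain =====

-- B replaces A's char-by-char state machine by a tokenizer (text segments / delimiter tokens)
-- plus a recursive emitter that returns a list of XML pieces joined once at the end (objective: alternative).

-- shared XML literals (the same string constants both Python versions contain)
def pvInstr (t : List Char) : List Char :=
  "<w:instrText xml:space=\"preserve\">".toList ++ t ++ "</w:instrText>".toList
def pvBegin : List Char := "<w:fldChar w:fldCharType=\"begin\"/>".toList
def pvSep : List Char := "<w:fldChar w:fldCharType=\"separate\"/>".toList
def pvWt (t : List Char) : List Char := "<w:t>".toList ++ t ++ "</w:t>".toList
def pvEnd : List Char := "<w:fldChar w:fldCharType=\"end\"/>".toList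

-- ===== PORT A =====
-- A's loop body: state = (result_str, temp_str, flag), one character at a time
def aStep (st : List Char × List Char × Bool) (c : Char) : List Char × List Char × Bool :=
  if ¬ (c = '{' ∨ c = '|' ∨ c = '}') then (st.1, st.2.1 ++ [c], st.2.2)
  else if c = '{' then
    ((if st.2.1.length > 0 then st.1 ++ pvInstr st.2.1 else st.1) ++ pvBegin, [], st.2.2)
  else if c = '|' then
    ((if st.2.2 = true ∧ st.2.1.length > 0 then st.1 ++ pvInstr st.2.1 else st.1), [], false)
  else
    if st.2.2 = false then (st.1 ++ pvSep ++ pvWt st.2.1 ++ pvEnd, [], true)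
    else ((if st.2.1.length > 0 then st.1 ++ pvInstr st.2.1 else st.1) ++ pvEnd, [], st.2.2)

def genFieldXml (fieldStr : String) (isBlock : Bool) : String :=
  let s0 := (PySem.Str.strip fieldStr).toList
  let s := if PySem.Chars.startswith s0 ['{'] && PySem.Chars.endswith s0 ['}'] then s0
           else '{' :: (s0 ++ ['}'])
  let init := (if isBlock then "<w:p><w:r>" else "<w:r>").toList
  String.mk ((s.foldl aStep (init, [], true)).1 ++
    (if isBlock then "</w:r></w:p>" else "</w:r>").toList)

-- ===== PORT B =====
-- tokenizer loop of Source B: state = (token list, current segment)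
def bTokStep (st : List (List Char) × List Char) (c : Char) : List (List Char) × List Char :=
  if c = '{' ∨ c = '|' ∨ c = '}' then (st.1 ++ [st.2, [c]], [])
  else (st.1, st.2 ++ [c])

def bTokens (s : List Char) : List (List Char) :=
  (s.foldl bTokStep ([], [])).1 ++ [(s.foldl bTokStep ([], [])).2]

-- recursive emitter of Source B over the token list
def bEmit : List (List Char) → Bool → List (List Char)
  | [], _ => []
  | [_], _ => []
  | text :: d :: rest, flag =>
    if d = ['{'] then
      ((if text ≠ [] then [pvInstr text] else []) ++ [pvBegin]) ++ bEmit rest flag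
    else if d = ['|'] then
      (if flag = true ∧ text ≠ [] then [pvInstr text] else []) ++ bEmit rest false
    else
      (if flag = false then [pvSep, pvWt text] else if text ≠ [] then [pvInstr text] else [])
        ++ [pvEnd] ++ bEmit rest (if flag = false then true else flag)

def genFieldXml_alt (fieldStr : String) (isBlock : Bool) : String :=
  let s0 := (PySem.Str.strip fieldStr).toList
  let s := if PySem.Chars.startswith s0 ['{'] && PySem.Chars.endswith s0 ['}'] then s0
           else '{' :: (s0 ++ ['}'])
  String.mk ((if isBlock then "<w:p><w:r>" else "<w:r>").toList ++
    (bEmit (bTokens s) true).flatten ++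
    (if isBlock then "</w:r></w:p>" else "</w:r>").toList)

-- ===== PRECONDITION & SPEC =====
def Spec_genFieldXml (fieldStr : String) (isBlock : Bool) (out : String) : Prop := out = genFieldXml_alt fieldStr isBlock
instance (fieldStr : String) (isBlock : Bool) (out : String) : Decidable (Spec_genFieldXml fieldStr isBlock out) := by unfold Spec_genFieldXml; infer_instance

-- ===== CLAIM (what is proved, stated in full; the proofs are below) =====
def Claim_equal_genFieldXml : Prop := ∀ (fieldStr : String) (isBlock : Bool), Dom_genFieldXml fieldStr isBlock → Spec_genFieldXml fieldStr isBlock (genFieldXml fieldStr isBlock)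

-- ===== LEMMAS AND PROOFS =====

-- reference tokenizer: tokAux seg cs = segments/delimiters of cs with pending segment seg
def tokAux : List Char → List Char → List (List Char)
  | seg, [] => [seg]
  | seg, c :: cs =>
    if c = '{' ∨ c = '|' ∨ c = '}' then seg :: [c] :: tokAux [] cs
    else tokAux (seg ++ [c]) cs

theorem tok_fold (cs : List Char) : ∀ (toks : List (List Char)) (seg : List Char),
    (cs.foldl bTokStep (toks, seg)).1 ++ [(cs.foldl bTokStep (toks, seg)).2] =
      toks ++ tokAux seg cs := by
  induction cs with
  | nil => intro toks seg; simp [tokAux]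
  | cons c cs ih =>
    intro toks seg
    by_cases h : c = '{' ∨ c = '|' ∨ c = '}' <;>
      simp [bTokStep, tokAux, h, List.foldl_cons, ih]

theorem bTokens_eq (s : List Char) : bTokens s = tokAux [] s := by
  simpa [bTokens] using tok_fold s [] []

theorem main_loop (cs : List Char) : ∀ (res temp : List Char) (flag : Bool),
    (cs.foldl aStep (res, temp, flag)).1 =
      res ++ (bEmit (tokAux temp cs) flag).flatten := by
  induction cs with
  | nil => intro res temp flag; simp [tokAux, bEmit]
  | cons c cs ih =>
    intro res temp flag
    rw [List.foldl_cons]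
    by_cases h : c = '{' ∨ c = '|' ∨ c = '}'
    · rcases h with h | h | h <;> subst h
      · rw [show aStep (res, temp, flag) '{' =
            ((if temp.length > 0 then res ++ pvInstr temp else res) ++ pvBegin, [], flag) from
            by simp [aStep], ih]
        rcases temp with _ | ⟨a, t⟩ <;>
          simp [tokAux, bEmit, List.append_assoc]
      · rw [show aStep (res, temp, flag) '|' =
            ((if flag = true ∧ temp.length > 0 then res ++ pvInstr temp else res), [], false) from
            by simp [aStep], ih]
        rcases temp with _ | ⟨a, t⟩ <;> cases flag <;>
          simp [tokAux, bEmit, List.append_assoc]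
      · cases flag
        · rw [show aStep (res, temp, false) '}' =
              (res ++ pvSep ++ pvWt temp ++ pvEnd, [], true) from by simp [aStep], ih]
          simp [tokAux, bEmit, List.append_assoc]
        · rw [show aStep (res, temp, true) '}' =
              ((if temp.length > 0 then res ++ pvInstr temp else res) ++ pvEnd, [], true) from
              by simp [aStep], ih]
          rcases temp with _ | ⟨a, t⟩ <;>
            simp [tokAux, bEmit, List.append_assoc]
    · rw [show aStep (res, temp, flag) c = (res, temp ++ [c], flag) from by simp [aStep, h], ih]
      simp [tokAux, h]


theorem ports_eq (fieldStr : String) (isBlock : Bool) :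
    genFieldXml fieldStr isBlock = genFieldXml_alt fieldStr isBlock := by
  unfold genFieldXml genFieldXml_alt
  dsimp only
  rw [bTokens_eq, main_loop, List.append_assoc]

-- ===== VERDICT (by name: the statement is the Claim_ definition above) =====
theorem genFieldXml_spec : Claim_equal_genFieldXml :=
  fun fieldStr isBlock _ => ports_eq fieldStr isBlock
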